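-- pv_equiv track=rewrite | github.com/steenade/PL-Kosyanenko | пр8-6-2.py | swap_max_min
-- ===== SOURCE A (Python) =====
-- def swap_max_min(matrix):
--     if not matrix or not matrix[0]:
--         return matrix
--     max_value = float('-inf')
--     min_value = float('inf')
--     max_position = (-1, -1)
--     min_position = (-1, -1)
--     for i in range(len(matrix)):
--         for j in range(len(matrix[i])):
--             if matrix[i][j] > max_value:
--                 max_value = matrix[i][j]
--                 max_position = (i, j)
--             if matrix[i][j] < min_value:
--                 min_value = matrix[i][j]
--                 min_position = (i, j)
--     if max_position != (-1, -1) and min_position != (-1, -1):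
--         matrix[max_position[0]][max_position[1]], matrix[min_position[0]][min_position[1]] =\
--             matrix[min_position[0]][min_position[1]], matrix[max_position[0]][max_position[1]]
--     return matrix
-- ===== SOURCE B (Python) =====
-- def swap_max_min(matrix):
--     if not matrix or not matrix[0]:
--         return matrix
--     cells = [(i, j) for i in range(len(matrix)) for j in range(len(matrix[i]))]
--     value = lambda p: matrix[p[0]][p[1]]
--     lo = sorted(cells, key=value)[0]
--     hi = sorted(cells, key=value, reverse=True)[0]
--     matrix[hi[0]][hi[1]], matrix[lo[0]][lo[1]] = matrix[lo[0]][lo[1]], matrix[hi[0]][hi[1]]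
--     return matrix
-- ===== Notes on version B (the rewrite author's own statement) =====
-- stated objective: alternative
-- what changed: A's combined single-pass nested loop tracking four pieces of state (max/min value with inf sentinels and positions) is replaced by a sort-based selection: flatten the matrix into a position list once, stable-sort it by cell value ascending and descending, and take the head of each sorted list (stability reproduces A's first-occurrence tie-breaking); then the same in-place swap.
import Mathlib
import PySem

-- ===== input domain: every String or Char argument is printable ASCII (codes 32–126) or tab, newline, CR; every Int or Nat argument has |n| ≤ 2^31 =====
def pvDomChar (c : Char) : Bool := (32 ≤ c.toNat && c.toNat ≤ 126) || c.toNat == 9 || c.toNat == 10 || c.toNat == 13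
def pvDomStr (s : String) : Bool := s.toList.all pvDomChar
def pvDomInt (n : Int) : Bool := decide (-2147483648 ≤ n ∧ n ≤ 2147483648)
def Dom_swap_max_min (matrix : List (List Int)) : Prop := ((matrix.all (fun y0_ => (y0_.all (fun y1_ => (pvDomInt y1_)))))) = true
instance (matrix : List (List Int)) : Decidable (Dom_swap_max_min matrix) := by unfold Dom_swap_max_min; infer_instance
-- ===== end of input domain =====

-- B replaces A's combined four-field sentinel-tracking nested scan by sort-based selection:
-- flatten to a position list, stable-sort it by cell value (ascending and descending) and take
-- each head; objective: alternative (O(n log n) sorts instead of the linear scan, same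
-- first-occurrence tie-breaking because the sort is stable). Both programs mutate the argument
-- in place identically; the equivalence proved here is about the return value.

-- ===== PORT A =====
-- helpers shared by both ports: the 2-D read and the simultaneous tuple swap are the very same
-- code in both Pythons. Positions reaching them come from range(len), hence are nonnegative and
-- in range, so List.getD / Int.toNat are exact here.
def get2 (m : List (List Int)) (p : Int × Int) : Int :=
  (m.getD p.1.toNat []).getD p.2.toNat 0

def set2 (m : List (List Int)) (p : Int × Int) (v : Int) : List (List Int) :=
  m.set p.1.toNat ((m.getD p.1.toNat []).set p.2.toNat v)

-- matrix[maxP], matrix[minP] = matrix[minP], matrix[maxP]: RHS evaluated first, then assigned left to right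
def swap2 (m : List (List Int)) (pmax pmin : Int × Int) : List (List Int) :=
  let a := get2 m pmax
  let b := get2 m pmin
  set2 (set2 m pmax b) pmin a

-- A's loop state: max_value/min_value (none = the float('-inf')/float('inf') sentinels), positions
structure SwState where
  maxV : Option Int
  minV : Option Int
  maxP : Int × Int
  minP : Int × Int
deriving Repr, DecidableEq

def swap_max_min (matrix : List (List Int)) : List (List Int) :=
  if matrix = [] ∨ matrix.headD [] = [] then matrix
  else
    let st := (List.range matrix.length).foldl (fun (st : SwState) (i : Nat) =>
      let row := matrix.getD i []
      (List.range row.length).foldl (fun (st : SwState) (j : Nat) =>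
        let v := row.getD j 0
        let st := if (match st.maxV with | none => true | some m => decide (m < v)) then
            { st with maxV := some v, maxP := ((i : Int), (j : Int)) } else st
        if (match st.minV with | none => true | some m => decide (v < m)) then
            { st with minV := some v, minP := ((i : Int), (j : Int)) } else st) st)
      ⟨none, none, (-1, -1), (-1, -1)⟩
    if st.maxP ≠ (-1, -1) ∧ st.minP ≠ (-1, -1) then swap2 matrix st.maxP st.minP
    else matrix

-- ===== PORT B =====
def swap_max_min_alt (matrix : List (List Int)) : List (List Int) :=
  if matrix = [] ∨ matrix.headD [] = [] then matrix
  else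
    let cells := (List.range matrix.length).flatMap
      (fun (i : Nat) => (List.range (matrix.getD i []).length).map (fun (j : Nat) => ((i : Int), (j : Int))))
    match (PySem.List.sorted cells (fun p => get2 matrix p) false).head?,
          (PySem.List.sorted cells (fun p => get2 matrix p) true).head? with
    | some lo, some hi => swap2 matrix hi lo
    | _, _ => matrix  -- unreachable: the guard makes cells nonempty, so Python's [0] cannot raise

-- ===== PRECONDITION & SPEC =====
def Spec_swap_max_min (matrix : List (List Int)) (out : List (List Int)) : Prop := out = swap_max_min_alt matrix
instance (matrix : List (List Int)) (out : List (List Int)) : Decidable (Spec_swap_max_min matrix out) := by unfold Spec_swap_max_min; infer_instance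

-- ===== CLAIM (what is proved, stated in full; the proofs are below) =====
def Claim_equal_swap_max_min : Prop := ∀ (matrix : List (List Int)), Dom_swap_max_min matrix → Spec_swap_max_min matrix (swap_max_min matrix)

-- ===== LEMMAS AND PROOFS =====

-- A's combined step over a single cell, expressed on positions
def cStep (matrix : List (List Int)) (st : SwState) (p : Int × Int) : SwState :=
  let v := get2 matrix p
  let st := if (match st.maxV with | none => true | some m => decide (m < v)) then
      { st with maxV := some v, maxP := p } else st
  if (match st.minV with | none => true | some m => decide (v < m)) then
      { st with minV := some v, minP := p } else st

-- the max- and min-halves of A's step, on their own state components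
def stepMax (key : Int × Int → Int) (s : Option Int × (Int × Int)) (p : Int × Int) : Option Int × (Int × Int) :=
  if (match s.1 with | none => true | some m => decide (m < key p)) then (some (key p), p) else s

def stepMin (key : Int × Int → Int) (s : Option Int × (Int × Int)) (p : Int × Int) : Option Int × (Int × Int) :=
  if (match s.1 with | none => true | some m => decide (key p < m)) then (some (key p), p) else s

-- first-occurrence extremum as an option fold (the common spec both programs are reduced to)
def oStepMax (key : Int × Int → Int) (acc : Option (Int × Int)) (p : Int × Int) : Option (Int × Int) :=
  match acc with | none => some p | some m => if key m < key p then some p else some m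

def oStepMin (key : Int × Int → Int) (acc : Option (Int × Int)) (p : Int × Int) : Option (Int × Int) :=
  match acc with | none => some p | some m => if key p < key m then some p else some m

-- the flattened position list both reasoning paths go through
def PS (matrix : List (List Int)) : List (Int × Int) :=
  (List.range matrix.length).flatMap
    (fun (i : Nat) => (List.range (matrix.getD i []).length).map (fun (j : Nat) => ((i : Int), (j : Int))))

-- A's nested loop is the fold of cStep over the flattened position list
theorem aLoop_eq (matrix : List (List Int)) (st0 : SwState) :
    (List.range matrix.length).foldl (fun (st : SwState) (i : Nat) =>
      let row := matrix.getD i []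
      (List.range row.length).foldl (fun (st : SwState) (j : Nat) =>
        let v := row.getD j 0
        let st := if (match st.maxV with | none => true | some m => decide (m < v)) then
            { st with maxV := some v, maxP := ((i : Int), (j : Int)) } else st
        if (match st.minV with | none => true | some m => decide (v < m)) then
            { st with minV := some v, minP := ((i : Int), (j : Int)) } else st) st) st0
    = (PS matrix).foldl (cStep matrix) st0 := by
  rw [PS, List.foldl_flatMap]
  congr 1
  funext st i
  rw [List.foldl_map]
  simp [cStep, get2]

-- one combined step is the pair of the two independent half-steps
theorem cStep_split (matrix : List (List Int)) (st : SwState) (p : Int × Int) :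
    cStep matrix st p =
      ⟨(stepMax (get2 matrix) (st.maxV, st.maxP) p).1, (stepMin (get2 matrix) (st.minV, st.minP) p).1,
       (stepMax (get2 matrix) (st.maxV, st.maxP) p).2, (stepMin (get2 matrix) (st.minV, st.minP) p).2⟩ := by
  rcases st with ⟨mv, nv, mp, np⟩
  simp only [cStep, stepMax, stepMin]
  by_cases h1 : (match mv with | none => true | some m => decide (m < get2 matrix p)) = true <;>
    by_cases h2 : (match nv with | none => true | some m => decide (get2 matrix p < m)) = true <;>
      simp [h1, h2]

theorem fold_split (matrix : List (List Int)) (ps : List (Int × Int)) (st : SwState) :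
    ps.foldl (cStep matrix) st =
      ⟨(ps.foldl (stepMax (get2 matrix)) (st.maxV, st.maxP)).1,
       (ps.foldl (stepMin (get2 matrix)) (st.minV, st.minP)).1,
       (ps.foldl (stepMax (get2 matrix)) (st.maxV, st.maxP)).2,
       (ps.foldl (stepMin (get2 matrix)) (st.minV, st.minP)).2⟩ := by
  induction ps generalizing st with
  | nil => rfl
  | cons p t ih => rw [List.foldl_cons, List.foldl_cons, List.foldl_cons, ih, cStep_split]

-- the half-steps track exactly the (key, position) view of the option folds
theorem foldMax_eq (key : Int × Int → Int) (ps : List (Int × Int)) (o : Option (Int × Int)) :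
    ps.foldl (stepMax key) (o.map key, o.getD (-1, -1)) =
      ((ps.foldl (oStepMax key) o).map key, (ps.foldl (oStepMax key) o).getD (-1, -1)) := by
  induction ps generalizing o with
  | nil => rfl
  | cons p t ih =>
    rw [List.foldl_cons, List.foldl_cons]
    rcases o with _ | m
    · have : stepMax key ((none : Option (Int × Int)).map key, (none : Option (Int × Int)).getD (-1, -1)) p
          = ((some p).map key, (some p).getD (-1, -1)) := by simp [stepMax]
      rw [this]; exact ih (some p)
    · by_cases h : key m < key p
      · have h1 : stepMax key ((some m).map key, (some m).getD (-1, -1)) p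
            = ((some p).map key, (some p).getD (-1, -1)) := by simp [stepMax, h]
        have h2 : oStepMax key (some m) p = some p := by simp [oStepMax, h]
        rw [h1, h2]; exact ih (some p)
      · have h1 : stepMax key ((some m).map key, (some m).getD (-1, -1)) p
            = ((some m).map key, (some m).getD (-1, -1)) := by simp [stepMax, h]
        have h2 : oStepMax key (some m) p = some m := by simp [oStepMax, h]
        rw [h1, h2]; exact ih (some m)

theorem foldMin_eq (key : Int × Int → Int) (ps : List (Int × Int)) (o : Option (Int × Int)) :
    ps.foldl (stepMin key) (o.map key, o.getD (-1, -1)) =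
      ((ps.foldl (oStepMin key) o).map key, (ps.foldl (oStepMin key) o).getD (-1, -1)) := by
  induction ps generalizing o with
  | nil => rfl
  | cons p t ih =>
    rw [List.foldl_cons, List.foldl_cons]
    rcases o with _ | m
    · have : stepMin key ((none : Option (Int × Int)).map key, (none : Option (Int × Int)).getD (-1, -1)) p
          = ((some p).map key, (some p).getD (-1, -1)) := by simp [stepMin]
      rw [this]; exact ih (some p)
    · by_cases h : key p < key m
      · have h1 : stepMin key ((some m).map key, (some m).getD (-1, -1)) p
            = ((some p).map key, (some p).getD (-1, -1)) := by simp [stepMin, h]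
        have h2 : oStepMin key (some m) p = some p := by simp [oStepMin, h]
        rw [h1, h2]; exact ih (some p)
      · have h1 : stepMin key ((some m).map key, (some m).getD (-1, -1)) p
            = ((some m).map key, (some m).getD (-1, -1)) := by simp [stepMin, h]
        have h2 : oStepMin key (some m) p = some m := by simp [oStepMin, h]
        rw [h1, h2]; exact ih (some m)

-- the head of the stable insertion-sort fold is the first-occurrence extremum fold
theorem head?_foldl_insertBy (bef : Int × Int → Int × Int → Bool)
    (ps : List (Int × Int)) (acc : List (Int × Int)) :
    (ps.foldl (fun acc x => PySem.List.insertBy bef x acc) acc).head? =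
      ps.foldl (fun (o : Option (Int × Int)) x =>
        match o with | none => some x | some m => if bef x m then some x else some m) acc.head? := by
  induction ps generalizing acc with
  | nil => rfl
  | cons p t ih =>
    rw [List.foldl_cons, List.foldl_cons, ih]
    congr 1
    rcases acc with _ | ⟨m, r⟩
    · rfl
    · by_cases h : bef p m = true <;> simp [PySem.List.insertBy, h]

theorem head?_sorted_asc (matrix : List (List Int)) (ps : List (Int × Int)) :
    (PySem.List.sorted ps (fun p => get2 matrix p) false).head? =
      ps.foldl (oStepMin (get2 matrix)) none := by
  rw [PySem.List.sorted_eq_foldl_insertBy, head?_foldl_insertBy]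
  congr 1
  funext o p
  rcases o with _ | m
  · rfl
  · simp [oStepMin]

theorem head?_sorted_desc (matrix : List (List Int)) (ps : List (Int × Int)) :
    (PySem.List.sorted ps (fun p => get2 matrix p) true).head? =
      ps.foldl (oStepMax (get2 matrix)) none := by
  rw [PySem.List.sorted_rev_eq_foldl_insertBy, head?_foldl_insertBy]
  congr 1
  funext o p
  rcases o with _ | m
  · rfl
  · simp [oStepMax]

theorem oFold_isSome (f : Option (Int × Int) → Int × Int → Option (Int × Int))
    (hf : ∀ o p, f o p ≠ none) (ps : List (Int × Int)) (o : Option (Int × Int))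
    (h : ps ≠ [] ∨ o ≠ none) : ps.foldl f o ≠ none := by
  induction ps generalizing o with
  | nil => exact h.resolve_left (fun hc => hc rfl)
  | cons p t ih => exact ih (f o p) (Or.inr (hf o p))

theorem oFold_mem (f : Option (Int × Int) → Int × Int → Option (Int × Int))
    (hf : ∀ o p q, f o p = some q → q = p ∨ o = some q)
    (ps : List (Int × Int)) (q : Int × Int)
    (h : ps.foldl f none = some q) : q ∈ ps := by
  have H : ∀ (ps : List (Int × Int)) (o : Option (Int × Int)),
      ps.foldl f o = some q → q ∈ ps ∨ o = some q := by
    intro ps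
    induction ps with
    | nil => intro o ho; exact Or.inr ho
    | cons p t ih =>
      intro o ho
      rcases ih (f o p) ho with hm | hs
      · exact Or.inl (List.mem_cons_of_mem _ hm)
      · rcases hf o p q hs with hq | hq
        · exact Or.inl (hq ▸ List.mem_cons_self)
        · exact Or.inr hq
  rcases H ps none h with hm | hc
  · exact hm
  · exact absurd hc (by simp)

theorem mem_PS_nonneg (matrix : List (List Int)) (p : Int × Int) (hp : p ∈ PS matrix) :
    0 ≤ p.1 ∧ 0 ≤ p.2 := by
  rw [PS] at hp
  rcases List.mem_flatMap.mp hp with ⟨i, _, hpm⟩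
  rcases List.mem_map.mp hpm with ⟨j, _, hpe⟩
  rw [← hpe]
  exact ⟨Int.natCast_nonneg i, Int.natCast_nonneg j⟩

theorem PS_ne_nil (matrix : List (List Int))
    (h : ¬ (matrix = [] ∨ matrix.headD [] = [])) : PS matrix ≠ [] := by
  obtain ⟨h1, h2⟩ := not_or.mp h
  rcases matrix with _ | ⟨a, t⟩
  · exact absurd rfl h1
  · have ha : a ≠ [] := by simpa using h2
    intro hPS
    have h00 : ((0 : Int), (0 : Int)) ∈ PS (a :: t) := by
      rw [PS]
      exact List.mem_flatMap.mpr ⟨0, by simp, List.mem_map.mpr ⟨0, List.mem_range.mpr (by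
        show 0 < ((a :: t).getD 0 []).length
        simpa [List.length_pos_iff] using ha), rfl⟩⟩
    rw [hPS] at h00
    exact absurd h00 (List.not_mem_nil)

-- ===== VERDICT (by name: the statement is the Claim_ definition above) =====
theorem swap_max_min_spec : Claim_equal_swap_max_min := by
  intro matrix _
  unfold Spec_swap_max_min swap_max_min swap_max_min_alt
  by_cases hg : matrix = [] ∨ matrix.headD [] = []
  · rw [if_pos hg, if_pos hg]
  · rw [if_neg hg, if_neg hg]
    show (if _ then _ else _) = _
    rw [aLoop_eq, fold_split]
    have hne := PS_ne_nil matrix hg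
    have hmaxs : (PS matrix).foldl (oStepMax (get2 matrix)) none ≠ none :=
      oFold_isSome _ (fun o p => by
        rcases o with _ | m
        · simp [oStepMax]
        · simp only [oStepMax]; split <;> simp) (PS matrix) none (Or.inl hne)
    have hmins : (PS matrix).foldl (oStepMin (get2 matrix)) none ≠ none :=
      oFold_isSome _ (fun o p => by
        rcases o with _ | m
        · simp [oStepMin]
        · simp only [oStepMin]; split <;> simp) (PS matrix) none (Or.inl hne)
    obtain ⟨mp, hmp⟩ := Option.ne_none_iff_exists'.mp hmaxs
    obtain ⟨np, hnp⟩ := Option.ne_none_iff_exists'.mp hmins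
    have hmax := foldMax_eq (get2 matrix) (PS matrix) none
    have hmin := foldMin_eq (get2 matrix) (PS matrix) none
    have hmv : ((none : Option (Int × Int)).map (get2 matrix),
        (none : Option (Int × Int)).getD (-1, -1)) = ((none : Option Int), ((-1 : Int), (-1 : Int))) := rfl
    rw [hmv, hmp] at hmax
    rw [hmv, hnp] at hmin
    rw [hmax, hmin]
    have hmpm : mp ∈ PS matrix := oFold_mem _ (fun o p q h => by
      rcases o with _ | m
      · simp [oStepMax] at h; exact Or.inl h.symm
      · simp only [oStepMax] at h
        split at h
        · exact Or.inl (Option.some_inj.mp h).symm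
        · exact Or.inr h) (PS matrix) mp hmp
    have hnpm : np ∈ PS matrix := oFold_mem _ (fun o p q h => by
      rcases o with _ | m
      · simp [oStepMin] at h; exact Or.inl h.symm
      · simp only [oStepMin] at h
        split at h
        · exact Or.inl (Option.some_inj.mp h).symm
        · exact Or.inr h) (PS matrix) np hnp
    have hmp1 := (mem_PS_nonneg matrix mp hmpm).1
    have hnp1 := (mem_PS_nonneg matrix np hnpm).1
    have hmpne : mp ≠ ((-1 : Int), (-1 : Int)) := by intro h; rw [h] at hmp1; omega
    have hnpne : np ≠ ((-1 : Int), (-1 : Int)) := by intro h; rw [h] at hnp1; omega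
    simp only [Option.getD_some]
    rw [if_pos ⟨hmpne, hnpne⟩]
    have hasc : (PySem.List.sorted (PS matrix) (fun p => get2 matrix p) false).head? = some np := by
      rw [head?_sorted_asc]; exact hnp
    have hdesc : (PySem.List.sorted (PS matrix) (fun p => get2 matrix p) true).head? = some mp := by
      rw [head?_sorted_desc]; exact hmp
    show _ = (match (PySem.List.sorted (PS matrix) (fun p => get2 matrix p) false).head?,
              (PySem.List.sorted (PS matrix) (fun p => get2 matrix p) true).head? with
      | some lo, some hi => swap2 matrix hi lo
      | _, _ => matrix)
    rw [hasc, hdesc]
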